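-- pv_equiv track=rewrite | github.com/Bonorinoa/leanecon_v3 | src/prover/prover.py | _active_proof_line
-- ===== SOURCE A (Python) =====
-- def _active_proof_line(code: str) -> int:
--     lines = code.splitlines()
--     for index, line in enumerate(lines, start=1):
--         if line.strip() in {"sorry", "exact?", "by"} or "sorry" in line:
--             return index
--     for index in range(len(lines), 0, -1):
--         if lines[index - 1].strip():
--             return index
--     return 1
-- ===== SOURCE B (Python) =====
-- def _active_proof_line(code: str) -> int:
--     last_nonempty = 0
--     for index, line in enumerate(code.splitlines(), start=1):
--         stripped = line.strip()
--         if stripped in ("sorry", "exact?", "by") or "sorry" in line: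
--             return index
--         if stripped:
--             last_nonempty = index
--     return last_nonempty if last_nonempty else 1
-- ===== Notes on version B (the rewrite author's own statement) =====
-- stated objective: simpler
-- what changed: One forward pass that tracks the last non-blank line index, replacing A's forward marker scan followed by a second backward scan for the last non-blank line.
import Mathlib
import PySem

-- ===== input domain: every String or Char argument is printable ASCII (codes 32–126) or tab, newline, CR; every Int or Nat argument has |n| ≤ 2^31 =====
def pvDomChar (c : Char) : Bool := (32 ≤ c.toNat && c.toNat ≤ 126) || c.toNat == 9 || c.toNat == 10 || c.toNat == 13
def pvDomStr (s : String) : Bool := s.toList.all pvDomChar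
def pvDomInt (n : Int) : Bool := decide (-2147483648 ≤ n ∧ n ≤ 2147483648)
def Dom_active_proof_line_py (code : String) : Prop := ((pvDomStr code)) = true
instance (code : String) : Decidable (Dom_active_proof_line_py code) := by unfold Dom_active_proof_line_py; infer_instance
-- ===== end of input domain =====

-- B changes the decomposition: one forward pass maintaining the last non-blank index,
-- instead of A's forward marker scan followed by a second backward scan. Same cost.

-- ===== PORT A =====

-- the marker test: line.strip() in {"sorry","exact?","by"} or "sorry" in line
def pvMarker (l : String) : Bool :=
  (PySem.Str.strip l == "sorry" || PySem.Str.strip l == "exact?" || PySem.Str.strip l == "by")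
    || PySem.Str.isIn "sorry" l

-- first loop: for index, line in enumerate(lines, start=1): if marker: return index
def pvAScan1 (lines : List String) (i : Int) : Option Int :=
  match lines with
  | [] => none
  | l :: rest => if pvMarker l then some i else pvAScan1 rest (i + 1)

-- second loop: for index in range(len(lines), 0, -1): if lines[index-1].strip(): return index
-- (recursion on the counting-down Nat; lines[index-1] is always in range, getD is exact here)
def pvAScan2 (lines : List String) : Nat → Int
  | 0 => 1                                   -- loop exhausted: return 1
  | n + 1 =>
    if PySem.Str.strip (lines.getD n "") ≠ "" then ((n : Int) + 1)
    else pvAScan2 lines n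

def active_proof_line_py (code : String) : Int :=
  let lines := PySem.Str.splitlines code
  match pvAScan1 lines 1 with
  | some i => i
  | none => pvAScan2 lines lines.length

-- ===== PORT B =====

-- single forward pass: early-return on a marker line, else track last non-blank index
def pvBLoop (lines : List String) (i : Int) (last : Int) : Int :=
  match lines with
  | [] => if last ≠ 0 then last else 1
  | l :: rest =>
    let stripped := PySem.Str.strip l
    if (stripped == "sorry" || stripped == "exact?" || stripped == "by")
        || PySem.Str.isIn "sorry" l then i
    else pvBLoop rest (i + 1) (if stripped ≠ "" then i else last)

def active_proof_line_py_alt (code : String) : Int :=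
  pvBLoop (PySem.Str.splitlines code) 1 0

-- ===== PRECONDITION & SPEC =====
def Spec_active_proof_line_py (code : String) (out : Int) : Prop := out = active_proof_line_py_alt code
instance (code : String) (out : Int) : Decidable (Spec_active_proof_line_py code out) := by unfold Spec_active_proof_line_py; infer_instance

-- ===== CLAIM (what is proved, stated in full; the proofs are below) =====
def Claim_equal_active_proof_line_py : Prop := ∀ (code : String), Dom_active_proof_line_py code → Spec_active_proof_line_py code (active_proof_line_py code)

-- ===== LEMMAS AND PROOFS =====

-- the last 1-based (offset i) index of a non-blank line, as a backward-preferring option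
def pvBackLast (lines : List String) (i : Int) : Option Int :=
  match lines with
  | [] => none
  | l :: rest =>
    (pvBackLast rest (i + 1)).or (if PySem.Str.strip l ≠ "" then some i else none)

theorem pvBackLast_append_singleton (xs : List String) (l : String) (i : Int) :
    pvBackLast (xs ++ [l]) i =
      if PySem.Str.strip l ≠ "" then some (i + xs.length) else pvBackLast xs i := by
  induction xs generalizing i with
  | nil => simp [pvBackLast, Option.or]
  | cons x xs ih =>
    simp only [List.cons_append, pvBackLast, ih]
    split <;> simp [Option.or] <;> try ring_nf

theorem pvAScan2_eq_backLast (lines : List String) (n : Nat) (hn : n ≤ lines.length) :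
    pvAScan2 lines n = (pvBackLast (lines.take n) 1).getD 1 := by
  induction n with
  | zero => simp [pvAScan2, pvBackLast]
  | succ n ih =>
    have hlt : n < lines.length := hn
    have htake : lines.take (n + 1) = lines.take n ++ [lines[n]] :=
      List.take_succ_eq_append_getElem hlt
    rw [pvAScan2, htake, pvBackLast_append_singleton]
    have hget : lines.getD n "" = lines[n] := List.getD_eq_getElem lines "" hlt
    have hlen : (lines.take n).length = n := List.length_take_of_le hlt.le
    rw [hget, hlen]
    split
    · simp; omega
    · exact ih hlt.le

theorem pvBLoop_eq (lines : List String) (i last : Int) (hi : 1 ≤ i) :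
    pvBLoop lines i last =
      match pvAScan1 lines i with
      | some r => r
      | none =>
        match pvBackLast lines i with
        | some j => j
        | none => if last ≠ 0 then last else 1 := by
  induction lines generalizing i last with
  | nil => simp [pvBLoop, pvAScan1, pvBackLast]
  | cons l rest ih =>
    by_cases hm : pvMarker l
    · simp only [pvBLoop, pvAScan1, pvMarker] at *
      rw [if_pos (by simpa [pvMarker] using hm), if_pos hm]
    · have hm' : ¬ ((PySem.Str.strip l == "sorry" || PySem.Str.strip l == "exact?"
          || PySem.Str.strip l == "by") || PySem.Str.isIn "sorry" l) = true := by
        simpa [pvMarker] using hm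
      simp only [pvBLoop, pvAScan1, pvBackLast, if_neg hm', if_neg hm]
      rw [ih (i + 1) _ (by omega)]
      cases pvAScan1 rest (i + 1) with
      | some r => rfl
      | none =>
        cases hb : pvBackLast rest (i + 1) with
        | some j => simp [Option.or]
        | none =>
          simp only [Option.or]
          by_cases hs : PySem.Str.strip l ≠ ""
          · simp [hs]
            omega
          · simp [hs]

-- ===== VERDICT (by name: the statement is the Claim_ definition above) =====
theorem active_proof_line_py_spec : Claim_equal_active_proof_line_py := by
  intro code _
  unfold Spec_active_proof_line_py active_proof_line_py active_proof_line_py_alt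
  rw [pvBLoop_eq _ 1 0 le_rfl]
  cases h1 : pvAScan1 (PySem.Str.splitlines code) 1 with
  | some r => simp [h1]
  | none =>
    simp only [h1]
    rw [pvAScan2_eq_backLast _ _ le_rfl, List.take_length]
    cases pvBackLast (PySem.Str.splitlines code) 1 <;> simp
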